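-- pv_equiv track=rewrite | github.com/CaiJingLong/marscode_prompt | 036_minimum_price_with_mushroom.py | solution
-- ===== SOURCE A (Python) =====
-- def solution(s, a, m, k):
--     # 将菜分为含蘑菇和不含蘑菇两类
--     mushroom = []
--     no_mushroom = []
--     for i in range(len(s)):
--         if s[i] == '1':
--             mushroom.append(a[i])
--         else:
--             no_mushroom.append(a[i])
--
--     # 对两类菜分别排序
--     mushroom.sort()
--     no_mushroom.sort()
--
--     # 预处理前缀和
--     prefix_m = [0] * (len(mushroom) + 1)
--     for i in range(len(mushroom)):
--         prefix_m[i+1] = prefix_m[i] + mushroom[i]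
--
--     prefix_nm = [0] * (len(no_mushroom) + 1)
--     for i in range(len(no_mushroom)):
--         prefix_nm[i+1] = prefix_nm[i] + no_mushroom[i]
--
--     # 遍历所有可能的含蘑菇菜的数量（0到m）
--     min_total = float('inf')
--     for i in range(min(m, len(mushroom)) + 1):
--         j = k - i
--         if j < 0 or j > len(no_mushroom):
--             continue
--         total = prefix_m[i] + prefix_nm[j]
--         if total < min_total:
--             min_total = total
--
--     return min_total if min_total != float('inf') else -1
-- ===== SOURCE B (Python) =====
-- def solution(s, a, m, k):
--     mush, other = [], []
--     for ch, price in zip(s, a):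
--         (mush if ch == '1' else other).append(price)
--     mush.sort()
--     other.sort()
--     if k < 0 or k > len(mush) + len(other):
--         return -1
--     # greedily take the k cheapest dishes by merging the two sorted lists
--     i = j = 0
--     total = 0
--     while i + j < k:
--         if j == len(other) or (i < len(mush) and mush[i] <= other[j]):
--             total += mush[i]
--             i += 1
--         else:
--             total += other[j]
--             j += 1
--     # mushroom cap exceeded: swap priciest taken mushroom dishes for cheapest remaining others
--     while i > m:
--         if i == 0 or j == len(other):
--             return -1
--         i -= 1
--         total += other[j] - mush[i]
--         j += 1
--     return total
-- ===== Notes on version B (the rewrite author's own statement) =====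
-- stated objective: alternative
-- what changed: Replaces the prefix-sum arrays plus enumeration of every feasible mushroom count with a greedy algorithm: merge the two sorted price lists to take the k cheapest dishes, then while the mushroom cap is exceeded swap the priciest taken mushroom dish for the cheapest untaken non-mushroom dish.
import Mathlib
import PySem

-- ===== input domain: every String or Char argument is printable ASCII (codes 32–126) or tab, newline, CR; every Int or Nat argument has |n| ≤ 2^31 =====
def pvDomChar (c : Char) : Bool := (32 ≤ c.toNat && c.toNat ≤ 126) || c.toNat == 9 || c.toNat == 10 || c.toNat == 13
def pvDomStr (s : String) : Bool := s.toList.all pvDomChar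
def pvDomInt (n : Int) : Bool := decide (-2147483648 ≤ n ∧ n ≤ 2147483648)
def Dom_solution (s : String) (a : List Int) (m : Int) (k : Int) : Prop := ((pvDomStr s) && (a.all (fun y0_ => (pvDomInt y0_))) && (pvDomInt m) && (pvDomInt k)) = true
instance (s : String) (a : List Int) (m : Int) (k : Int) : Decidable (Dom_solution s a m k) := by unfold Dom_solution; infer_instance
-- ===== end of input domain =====

-- B replaces A's prefix-sum arrays + enumeration of all feasible mushroom counts by a greedy
-- merge of the two sorted price lists (take the k cheapest) followed by cap-restoring swaps.

-- ===== PORT A =====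
def solution (s : String) (a : List Int) (m : Int) (k : Int) : Int :=
  let cs := s.toList
  -- split into mushroom / no_mushroom prices
  let split := (PySem.List.pyRange 0 (cs.length : Int) 1).foldl
    (fun (p : List Int × List Int) i =>
      if PySem.List.pyGetD cs i ' ' = '1' then (p.1 ++ [PySem.List.pyGetD a i 0], p.2)
      else (p.1, p.2 ++ [PySem.List.pyGetD a i 0])) ([], [])
  let mushroom := PySem.List.sorted split.1 (fun x => x) false
  let noMushroom := PySem.List.sorted split.2 (fun x => x) false
  -- prefix sums
  let prefixM := (PySem.List.pyRange 0 (mushroom.length : Int) 1).foldl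
    (fun pre i => PySem.List.pySetD pre (i + 1) (PySem.List.pyGetD pre i 0 + PySem.List.pyGetD mushroom i 0))
    (PySem.List.pyRepeat [(0 : Int)] ((mushroom.length : Int) + 1))
  let prefixNM := (PySem.List.pyRange 0 (noMushroom.length : Int) 1).foldl
    (fun pre i => PySem.List.pySetD pre (i + 1) (PySem.List.pyGetD pre i 0 + PySem.List.pyGetD noMushroom i 0))
    (PySem.List.pyRepeat [(0 : Int)] ((noMushroom.length : Int) + 1))
  -- enumerate possible numbers of mushroom dishes; min_total = none means +inf
  let minTotal := (PySem.List.pyRange 0 (min m (mushroom.length : Int) + 1) 1).foldl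
    (fun (mt : Option Int) i =>
      let j := k - i
      if j < 0 ∨ j > (noMushroom.length : Int) then mt
      else
        let total := PySem.List.pyGetD prefixM i 0 + PySem.List.pyGetD prefixNM j 0
        if (match mt with | none => true | some v => decide (total < v) : Bool) then some total else mt)
    none
  match minTotal with
  | some v => v
  | none => -1

-- ===== PORT B =====
-- while i + j < k: take the cheaper head of the two sorted lists (fuel = k - i - j)
def bMerge (ms ns : List Int) (i j : Nat) (total : Int) : Nat → Nat × Nat × Int
  | 0 => (i, j, total)
  | fuel + 1 =>
    if j = ns.length ∨ (i < ms.length ∧ ms.getD i 0 ≤ ns.getD j 0) then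
      bMerge ms ns (i + 1) j (total + ms.getD i 0) fuel
    else
      bMerge ms ns i (j + 1) (total + ns.getD j 0) fuel

-- while i > m: swap out mushroom dish i-1 for non-mushroom dish j (recursion on i)
def bSwap (ms ns : List Int) (m : Int) (j : Nat) (total : Int) : Nat → Int
  | 0 => if m < 0 then -1 else total
  | i + 1 =>
    if m < (i : Int) + 1 then
      if j = ns.length then -1
      else bSwap ms ns m (j + 1) (total + ns.getD j 0 - ms.getD i 0) i
    else total

def solution_alt (s : String) (a : List Int) (m : Int) (k : Int) : Int :=
  let split := (s.toList.zip a).foldl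
    (fun (p : List Int × List Int) cp =>
      if cp.1 = '1' then (p.1 ++ [cp.2], p.2) else (p.1, p.2 ++ [cp.2])) ([], [])
  let ms := PySem.List.sorted split.1 (fun x => x) false
  let ns := PySem.List.sorted split.2 (fun x => x) false
  if k < 0 ∨ k > ((ms.length : Int) + (ns.length : Int)) then -1
  else
    let r := bMerge ms ns 0 0 0 k.toNat
    bSwap ms ns m r.2.1 r.2.2 r.1

-- ===== PRECONDITION & SPEC =====
-- Pre_ excludes exactly the inputs where A raises IndexError: a shorter than s.
def Pre_solution (s : String) (a : List Int) (m : Int) (k : Int) : Prop :=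
  s.toList.length ≤ a.length
instance (s : String) (a : List Int) (m : Int) (k : Int) : Decidable (Pre_solution s a m k) := by
  unfold Pre_solution; infer_instance
def pvWitness_solution : String × List Int × Int × Int := ("101", [4, 2, 7], 1, 2)

def Spec_solution (s : String) (a : List Int) (m : Int) (k : Int) (out : Int) : Prop := out = solution_alt s a m k
instance (s : String) (a : List Int) (m : Int) (k : Int) (out : Int) : Decidable (Spec_solution s a m k out) := by unfold Spec_solution; infer_instance

-- ===== CLAIM (what is proved, stated in full; the proofs are below) =====
def Claim_equal_solution : Prop := ∀ (s : String) (a : List Int) (m : Int) (k : Int), Dom_solution s a m k → Pre_solution s a m k → Spec_solution s a m k (solution s a m k)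


-- ===== LEMMAS AND PROOFS =====

-- sum of the n cheapest elements of xs (xs used via List.take)
def pvS (xs : List Int) (n : Nat) : Int := (xs.take n).sum

-- cost of taking n mushroom dishes and K - n others
def pvF (ms ns : List Int) (K n : Nat) : Int := pvS ms n + pvS ns (K - n)

-- the running-min update of port A's loop (min_total = none means +inf)
def aStep (mt : Option Int) (t : Int) : Option Int :=
  if (match mt with | none => true | some v => decide (t < v) : Bool) then some t else mt

-- prefix_m[i] + prefix_nm[k-i] of port A, with the prefix arrays written out
def aG (ms ns : List Int) (k i : Int) : Int :=
  PySem.List.pyGetD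
    ((PySem.List.pyRange 0 (ms.length : Int) 1).foldl
      (fun pre i => PySem.List.pySetD pre (i + 1) (PySem.List.pyGetD pre i 0 + PySem.List.pyGetD ms i 0))
      (PySem.List.pyRepeat [(0 : Int)] ((ms.length : Int) + 1))) i 0 +
  PySem.List.pyGetD
    ((PySem.List.pyRange 0 (ns.length : Int) 1).foldl
      (fun pre i => PySem.List.pySetD pre (i + 1) (PySem.List.pyGetD pre i 0 + PySem.List.pyGetD ns i 0))
      (PySem.List.pyRepeat [(0 : Int)] ((ns.length : Int) + 1))) (k - i) 0

-- the tail of port A after the two sorted lists are built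
def aTail (ms ns : List Int) (m k : Int) : Int :=
  match (PySem.List.pyRange 0 (min m (ms.length : Int) + 1) 1).foldl
      (fun (mt : Option Int) i =>
        if k - i < 0 ∨ k - i > (ns.length : Int) then mt else aStep mt (aG ms ns k i)) none with
  | some v => v
  | none => -1

-- the tail of port B after the two sorted lists are built
def bTail (ms ns : List Int) (m k : Int) : Int :=
  if k < 0 ∨ k > ((ms.length : Int) + (ns.length : Int)) then -1
  else
    let r := bMerge ms ns 0 0 0 k.toNat
    bSwap ms ns m r.2.1 r.2.2 r.1

-- the common split of (s, a) into mushroom / other price lists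
def pvSplit (s : String) (a : List Int) : List Int × List Int :=
  (((s.toList.zip a).filter (fun cp => decide (cp.1 = '1'))).map (fun cp => cp.2),
   ((s.toList.zip a).filter (fun cp => decide (¬ cp.1 = '1'))).map (fun cp => cp.2))

lemma split_fold (l : List (Char × Int)) (acc : List Int × List Int) :
    l.foldl (fun (p : List Int × List Int) cp =>
        if cp.1 = '1' then (p.1 ++ [cp.2], p.2) else (p.1, p.2 ++ [cp.2])) acc
      = (acc.1 ++ (l.filter (fun cp => decide (cp.1 = '1'))).map (fun cp => cp.2),
         acc.2 ++ (l.filter (fun cp => decide (¬ cp.1 = '1'))).map (fun cp => cp.2)) := by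
  induction l generalizing acc with
  | nil => simp
  | cons c t ih =>
    by_cases h : c.1 = '1' <;> simp [List.foldl_cons, h, ih]

lemma zip_index_fold {β : Type} (cs : List Char) (a : List Int) (h : cs.length ≤ a.length)
    (F : β → Char → Int → β) (init : β) :
    (PySem.List.pyRange 0 (cs.length : Int) 1).foldl
        (fun p i => F p (PySem.List.pyGetD cs i ' ') (PySem.List.pyGetD a i 0)) init
      = (cs.zip a).foldl (fun p cp => F p cp.1 cp.2) init := by
  have hzip : cs.zip a = (List.range cs.length).map (fun j => (cs.getD j ' ', a.getD j 0)) := by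
    apply List.ext_getElem
    · simp; omega
    · intro i h1 h2
      have hia : i < a.length := by simp at h1; omega
      have hic : i < cs.length := by simp at h1; omega
      simp [List.getElem_zip, List.getD_eq_getElem, hia, hic]
  rw [hzip, List.foldl_map, PySem.List.pyRange_zero_nat, List.foldl_map]
  apply PySem.List.foldl_congr_mem
  intro acc x hx
  simp

lemma solution_eq_aTail (s : String) (a : List Int) (m k : Int)
    (hpre : s.toList.length ≤ a.length) :
    solution s a m k =
      aTail (PySem.List.sorted (pvSplit s a).1 (fun x => x) false)
            (PySem.List.sorted (pvSplit s a).2 (fun x => x) false) m k := by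
  have hlen : s.toList.length ≤ a.length := hpre
  have hsplit : (PySem.List.pyRange 0 (s.toList.length : Int) 1).foldl
      (fun (p : List Int × List Int) i =>
        if PySem.List.pyGetD s.toList i ' ' = '1' then (p.1 ++ [PySem.List.pyGetD a i 0], p.2)
        else (p.1, p.2 ++ [PySem.List.pyGetD a i 0])) ([], []) = pvSplit s a := by
    rw [zip_index_fold s.toList a hlen
        (fun p c x => if c = '1' then (p.1 ++ [x], p.2) else (p.1, p.2 ++ [x])) ([], [])]
    simp only [split_fold, List.nil_append, pvSplit]
  have hrfl : solution s a m k =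
      aTail (PySem.List.sorted ((PySem.List.pyRange 0 (s.toList.length : Int) 1).foldl
          (fun (p : List Int × List Int) i =>
            if PySem.List.pyGetD s.toList i ' ' = '1' then (p.1 ++ [PySem.List.pyGetD a i 0], p.2)
            else (p.1, p.2 ++ [PySem.List.pyGetD a i 0])) ([], [])).1 (fun x => x) false)
        (PySem.List.sorted ((PySem.List.pyRange 0 (s.toList.length : Int) 1).foldl
          (fun (p : List Int × List Int) i =>
            if PySem.List.pyGetD s.toList i ' ' = '1' then (p.1 ++ [PySem.List.pyGetD a i 0], p.2)
            else (p.1, p.2 ++ [PySem.List.pyGetD a i 0])) ([], [])).2 (fun x => x) false) m k := rfl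
  rw [hrfl, hsplit]

lemma alt_eq_bTail (s : String) (a : List Int) (m k : Int) :
    solution_alt s a m k =
      bTail (PySem.List.sorted (pvSplit s a).1 (fun x => x) false)
            (PySem.List.sorted (pvSplit s a).2 (fun x => x) false) m k := by
  unfold solution_alt bTail pvSplit
  simp only [split_fold, List.nil_append]

lemma pvS_succ (xs : List Int) (n : Nat) (h : n < xs.length) :
    pvS xs (n + 1) = pvS xs n + xs.getD n 0 := by
  unfold pvS
  rw [List.take_succ]
  simp [List.getD_eq_getElem, h, List.getElem?_eq_getElem h]

lemma prefix_fold_aux (xs : List Int) (t : Nat) (ht : t ≤ xs.length) :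
    (PySem.List.pyRange 0 (t : Int) 1).foldl
      (fun pre i => PySem.List.pySetD pre (i + 1) (PySem.List.pyGetD pre i 0 + PySem.List.pyGetD xs i 0))
      (PySem.List.pyRepeat [(0 : Int)] ((xs.length : Int) + 1))
    = (List.range (t + 1)).map (pvS xs) ++ List.replicate (xs.length - t) 0 := by
  induction t with
  | zero =>
    rw [PySem.List.pyRange_one_eq_nil (by omega)]
    simp [PySem.List.pyRepeat_singleton, pvS]
    simp [List.replicate_succ]
  | succ t ih =>
    have ht' : t ≤ xs.length := by omega
    rw [show ((t + 1 : Nat) : Int) = (t : Int) + 1 by push_cast; ring,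
        PySem.List.pyRange_one_succ_right (by omega), List.foldl_append, ih ht']
    simp only [List.foldl_cons, List.foldl_nil]
    have hgetD : PySem.List.pyGetD
        ((List.range (t + 1)).map (pvS xs) ++ List.replicate (xs.length - t) 0) (t : Int) 0
        = pvS xs t := by
      rw [PySem.List.pyGetD_natCast]
      rw [List.getD_eq_getElem _ _ (by simp; omega)]
      rw [List.getElem_append_left (by simp)]
      simp
    rw [hgetD]
    rw [show ((t : Int) + 1) = (((t + 1 : Nat)) : Int) by push_cast; ring]
    rw [PySem.List.pySetD_natCast]
    apply List.ext_getElem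
    · simp; omega
    · intro idx h1 h2
      have hlen : ((List.range (t + 1)).map (pvS xs)).length = t + 1 := by simp
      have hidx : idx < xs.length + 2 := by simp at h1; omega
      rw [List.getElem_set]
      by_cases he : t + 1 = idx
      · subst he
        rw [if_pos rfl, List.getElem_append_left (by simp)]
        rw [List.getElem_map, List.getElem_range, pvS_succ xs t (by omega)]
        simp
      · rw [if_neg he]
        by_cases hlt : idx < t + 1
        · rw [List.getElem_append_left (by simp; omega), List.getElem_append_left (by simp; omega)]
          simp
        · rw [List.getElem_append_right (by simp; omega), List.getElem_append_right (by simp; omega)]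
          simp

lemma prefix_getD (xs : List Int) (i : Int) (h0 : 0 ≤ i) (h1 : i ≤ (xs.length : Int)) :
    PySem.List.pyGetD
      ((PySem.List.pyRange 0 (xs.length : Int) 1).foldl
        (fun pre i => PySem.List.pySetD pre (i + 1) (PySem.List.pyGetD pre i 0 + PySem.List.pyGetD xs i 0))
        (PySem.List.pyRepeat [(0 : Int)] ((xs.length : Int) + 1))) i 0
    = pvS xs i.toNat := by
  rw [prefix_fold_aux xs xs.length le_rfl]
  rw [show i = ((i.toNat : Nat) : Int) by omega, PySem.List.pyGetD_natCast]
  rw [List.getD_eq_getElem _ _ (by simp; omega)]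
  rw [List.getElem_append_left (by simp; omega)]
  simp
  congr 1
  omega

lemma aStep_some (l : List Int) (v : Int) : l.foldl aStep (some v) = some (l.foldl min v) := by
  induction l generalizing v with
  | nil => rfl
  | cons x t ih =>
    have hstep : aStep (some v) x = some (min v x) := by
      by_cases h : x < v
      · have hm : min v x = x := by omega
        simp [aStep, h, hm]
      · have hm : min v x = v := by omega
        simp [aStep, h, hm]
    simp only [List.foldl_cons, hstep, ih]

lemma aStep_none (l : List Int) : l.foldl aStep none = l.min? := by
  cases l with
  | nil => rfl
  | cons x t =>
    have h0 : aStep none x = some x := rfl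
    simp only [List.foldl_cons, h0, aStep_some, List.min?_cons']

lemma aTail_eq (ms ns : List Int) (m k : Int) :
    aTail ms ns m k =
      match (((PySem.List.pyRange 0 (min m (ms.length : Int) + 1) 1).filter
          (fun i => decide (¬ (k - i < 0 ∨ k - i > (ns.length : Int))))).map
          (fun i => pvF ms ns k.toNat i.toNat)).min? with
      | some v => v
      | none => -1 := by
  unfold aTail
  have hbody : ∀ (mt : Option Int) (i : Int), i ∈ PySem.List.pyRange 0 (min m (ms.length : Int) + 1) 1 →
      (if k - i < 0 ∨ k - i > (ns.length : Int) then mt else aStep mt (aG ms ns k i))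
      = (if ¬ (k - i < 0 ∨ k - i > (ns.length : Int)) then aStep mt (pvF ms ns k.toNat i.toNat) else mt) := by
    intro mt i hi
    have hi0 : 0 ≤ i := (PySem.List.mem_pyRange_one.mp hi).1
    have hi1 : i < min m (ms.length : Int) + 1 := (PySem.List.mem_pyRange_one.mp hi).2
    by_cases hc : k - i < 0 ∨ k - i > (ns.length : Int)
    · rw [if_pos hc, if_neg (not_not_intro hc)]
    · have hg : aG ms ns k i = pvF ms ns k.toNat i.toNat := by
        unfold aG
        rw [prefix_getD ms i hi0 (by omega), prefix_getD ns (k - i) (by omega) (by omega)]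
        unfold pvF
        congr 2
        omega
      rw [if_neg hc, if_pos hc, hg]
  suffices h : (PySem.List.pyRange 0 (min m (ms.length : Int) + 1) 1).foldl
      (fun (mt : Option Int) i =>
        if k - i < 0 ∨ k - i > (ns.length : Int) then mt else aStep mt (aG ms ns k i)) none
      = (((PySem.List.pyRange 0 (min m (ms.length : Int) + 1) 1).filter
          (fun i => decide (¬ (k - i < 0 ∨ k - i > (ns.length : Int))))).map
          (fun i => pvF ms ns k.toNat i.toNat)).min? by
    rw [h]
  refine (PySem.List.foldl_congr_mem _ _ _ none hbody).trans ?_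
  refine (PySem.List.foldl_ite_eq_foldl_filter
    (p := fun i => ¬ (k - i < 0 ∨ k - i > (ns.length : Int)))
    (fun mt i => aStep mt (pvF ms ns k.toNat i.toNat)) _ none).trans ?_
  rw [← List.foldl_map, aStep_none]

lemma bSwap_spec (ms ns : List Int) (m : Int) :
    ∀ (i j : Nat) (total : Int), i ≤ ms.length → j ≤ ns.length →
    total = pvS ms i + pvS ns j →
    bSwap ms ns m j total i =
      if (i : Int) ≤ m then total
      else if 0 ≤ m ∧ (i : Int) - m ≤ (ns.length : Int) - (j : Int) then
        pvS ms m.toNat + pvS ns (j + (i - m.toNat))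
      else -1 := by
  intro i
  induction i with
  | zero =>
    intro j total _ _ htot
    simp only [bSwap]
    split_ifs with h1 h2 h3 <;> first | rfl | omega
  | succ i ih =>
    intro j total hi hj htot
    simp only [bSwap]
    by_cases hm : m < (i : Int) + 1
    · rw [if_pos hm]
      by_cases hjl : j = ns.length
      · rw [if_pos hjl]
        split_ifs <;> first | rfl | (exfalso; omega)
      · rw [if_neg hjl]
        have hjlt : j < ns.length := by omega
        have htot' : total + ns.getD j 0 - ms.getD i 0 = pvS ms i + pvS ns (j + 1) := by
          rw [pvS_succ ns j hjlt, htot, pvS_succ ms i (by omega)]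
          ring
        rw [ih (j + 1) _ (by omega) (by omega) htot']
        split_ifs
        all_goals try rfl
        all_goals try (exfalso; omega)
        all_goals try (congr 1 <;> (try congr 1) <;> omega)
        all_goals (rw [htot']; congr 1 <;> (try congr 1) <;> omega)
    · rw [if_neg hm]
      split_ifs <;> first | rfl | (exfalso; omega)

lemma bMerge_spec (ms ns : List Int)
    (hms : ∀ p q : Nat, p ≤ q → q < ms.length → ms.getD p 0 ≤ ms.getD q 0)
    (hns : ∀ p q : Nat, p ≤ q → q < ns.length → ns.getD p 0 ≤ ns.getD q 0) :
    ∀ (fuel i j : Nat) (total : Int),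
    i ≤ ms.length → j ≤ ns.length → i + j + fuel ≤ ms.length + ns.length →
    total = pvS ms i + pvS ns j →
    (i = 0 ∨ j = ns.length ∨ ms.getD (i - 1) 0 ≤ ns.getD j 0) →
    (j = 0 ∨ i = ms.length ∨ ns.getD (j - 1) 0 ≤ ms.getD i 0) →
    (bMerge ms ns i j total fuel).1 + (bMerge ms ns i j total fuel).2.1 = i + j + fuel ∧
    (bMerge ms ns i j total fuel).1 ≤ ms.length ∧
    (bMerge ms ns i j total fuel).2.1 ≤ ns.length ∧
    (bMerge ms ns i j total fuel).2.2 =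
      pvS ms (bMerge ms ns i j total fuel).1 + pvS ns (bMerge ms ns i j total fuel).2.1 ∧
    ((bMerge ms ns i j total fuel).1 = 0 ∨ (bMerge ms ns i j total fuel).2.1 = ns.length ∨
      ms.getD ((bMerge ms ns i j total fuel).1 - 1) 0 ≤ ns.getD (bMerge ms ns i j total fuel).2.1 0) ∧
    ((bMerge ms ns i j total fuel).2.1 = 0 ∨ (bMerge ms ns i j total fuel).1 = ms.length ∨
      ns.getD ((bMerge ms ns i j total fuel).2.1 - 1) 0 ≤ ms.getD (bMerge ms ns i j total fuel).1 0) := by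
  intro fuel
  induction fuel with
  | zero =>
    intro i j total hi hj hsum htot h1 h2
    simp only [bMerge]
    exact ⟨rfl, hi, hj, htot, h1, h2⟩
  | succ fuel ih =>
    intro i j total hi hj hsum htot h1 h2
    simp only [bMerge]
    by_cases hc : j = ns.length ∨ (i < ms.length ∧ ms.getD i 0 ≤ ns.getD j 0)
    · rw [if_pos hc]
      have hilt : i < ms.length := by
        rcases hc with hc | hc
        · omega
        · exact hc.1
      rw [show i + j + (fuel + 1) = i + 1 + j + fuel by omega]
      refine ih (i + 1) j (total + ms.getD i 0) (by omega) hj (by omega)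
        (by rw [htot, pvS_succ ms i hilt]; ring) ?_ ?_
      · rcases hc with hc | hc
        · exact Or.inr (Or.inl hc)
        · simpa using Or.inr hc.2
      · rcases h2 with h2 | h2 | h2
        · exact Or.inl h2
        · omega
        · by_cases he : i + 1 = ms.length
          · exact Or.inr (Or.inl he)
          · exact Or.inr (Or.inr (le_trans h2 (hms i (i + 1) (by omega) (by omega))))
    · rw [if_neg hc]
      push_neg at hc
      have hjlt : j < ns.length := by
        rcases Nat.lt_or_ge (i + j) (ms.length + ns.length) with h | h
        · omega
        · omega
      rw [show i + j + (fuel + 1) = i + (j + 1) + fuel by omega]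
      refine ih i (j + 1) (total + ns.getD j 0) hi (by omega) (by omega)
        (by rw [htot, pvS_succ ns j hjlt]; ring) ?_ ?_
      · rcases h1 with h1 | h1 | h1
        · exact Or.inl h1
        · omega
        · by_cases he : j + 1 = ns.length
          · exact Or.inr (Or.inl he)
          · exact Or.inr (Or.inr (le_trans h1 (hns j (j + 1) (by omega) (by omega))))
      · rcases Nat.lt_or_ge i ms.length with him | him
        · have := hc.2 him
          simpa using Or.inr (le_of_lt this)
        · exact Or.inr (Or.inl (by omega))

lemma f_anti (ms ns : List Int)
    (hms : ∀ p q : Nat, p ≤ q → q < ms.length → ms.getD p 0 ≤ ms.getD q 0)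
    (hns : ∀ p q : Nat, p ≤ q → q < ns.length → ns.getD p 0 ≤ ns.getD q 0)
    (K c : Nat) (hcm : c ≤ ms.length) (hcK : c ≤ K)
    (hanchor : c = 0 ∨ K - c = ns.length ∨ ms.getD (c - 1) 0 ≤ ns.getD (K - c) 0) :
    ∀ (d i t : Nat), i + d = t → t ≤ c → K - i ≤ ns.length → pvF ms ns K t ≤ pvF ms ns K i := by
  intro d
  induction d with
  | zero =>
    intro i t hit _ _
    have : i = t := by omega
    rw [this]
  | succ d ihd =>
    intro i t hit htc hKi
    have h1 : pvF ms ns K t ≤ pvF ms ns K (i + 1) := ihd (i + 1) t (by omega) htc (by omega)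
    have key : ms.getD i 0 ≤ ns.getD (K - (i + 1)) 0 := by
      rcases hanchor with h | h | h
      · omega
      · omega
      · calc ms.getD i 0 ≤ ms.getD (c - 1) 0 := hms i (c - 1) (by omega) (by omega)
          _ ≤ ns.getD (K - c) 0 := h
          _ ≤ ns.getD (K - (i + 1)) 0 := hns (K - c) (K - (i + 1)) (by omega) (by omega)
    have h2 : pvF ms ns K (i + 1) ≤ pvF ms ns K i := by
      unfold pvF
      rw [pvS_succ ms i (by omega), show K - i = (K - (i + 1)) + 1 by omega,
        pvS_succ ns (K - (i + 1)) (by omega)]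
      linarith
    exact le_trans h1 h2

lemma f_mono (ms ns : List Int)
    (hms : ∀ p q : Nat, p ≤ q → q < ms.length → ms.getD p 0 ≤ ms.getD q 0)
    (hns : ∀ p q : Nat, p ≤ q → q < ns.length → ns.getD p 0 ≤ ns.getD q 0)
    (K c : Nat) (hcK : c ≤ K) (hKc : K - c ≤ ns.length)
    (hanchor : K - c = 0 ∨ c = ms.length ∨ ns.getD (K - c - 1) 0 ≤ ms.getD c 0) :
    ∀ (d i : Nat), i = c + d → i ≤ ms.length → i ≤ K → pvF ms ns K c ≤ pvF ms ns K i := by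
  intro d
  induction d with
  | zero =>
    intro i hic _ _
    have : i = c := by omega
    rw [this]
  | succ d ihd =>
    intro i hic him hiK
    have h1 : pvF ms ns K c ≤ pvF ms ns K (c + d) := ihd (c + d) rfl (by omega) (by omega)
    have key : ns.getD (K - (c + d) - 1) 0 ≤ ms.getD (c + d) 0 := by
      rcases hanchor with h | h | h
      · omega
      · omega
      · calc ns.getD (K - (c + d) - 1) 0 ≤ ns.getD (K - c - 1) 0 :=
              hns (K - (c + d) - 1) (K - c - 1) (by omega) (by omega)
          _ ≤ ms.getD c 0 := h
          _ ≤ ms.getD (c + d) 0 := hms c (c + d) (by omega) (by omega)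
    have h2 : pvF ms ns K (c + d) ≤ pvF ms ns K (c + d + 1) := by
      unfold pvF
      rw [pvS_succ ms (c + d) (by omega), show K - (c + d) = (K - (c + d + 1)) + 1 by omega,
        pvS_succ ns (K - (c + d + 1)) (by omega)]
      have : K - (c + d + 1) = K - (c + d) - 1 := by omega
      rw [this]
      linarith
    rw [show i = c + d + 1 by omega]
    exact le_trans h1 h2

lemma tails_eq (ms ns : List Int) (m k : Int)
    (hms : ∀ p q : Nat, p ≤ q → q < ms.length → ms.getD p 0 ≤ ms.getD q 0)
    (hns : ∀ p q : Nat, p ≤ q → q < ns.length → ns.getD p 0 ≤ ns.getD q 0) :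
    aTail ms ns m k = bTail ms ns m k := by
  rw [aTail_eq]
  unfold bTail
  by_cases hk0 : k < 0 ∨ k > ((ms.length : Int) + (ns.length : Int))
  · rw [if_pos hk0]
    have hfil : (PySem.List.pyRange 0 (min m (ms.length : Int) + 1) 1).filter
        (fun i => decide (¬ (k - i < 0 ∨ k - i > (ns.length : Int)))) = [] := by
      rw [List.filter_eq_nil_iff]
      intro i hi
      have h0 : 0 ≤ i := (PySem.List.mem_pyRange_one.mp hi).1
      have h1 : i < min m (ms.length : Int) + 1 := (PySem.List.mem_pyRange_one.mp hi).2
      simp only [decide_eq_true_eq, not_not]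
      omega
    rw [hfil]
    rfl
  · rw [if_neg hk0]
    push_neg at hk0
    have hmerge := bMerge_spec ms ns hms hns k.toNat 0 0 0 (by omega) (by omega)
      (by omega) (by simp [pvS]) (Or.inl rfl) (Or.inl rfl)
    obtain ⟨hsum, hc1, hc2, htot, hA1, hA2⟩ := hmerge
    have hjc : (bMerge ms ns 0 0 0 k.toNat).2.1 = k.toNat - (bMerge ms ns 0 0 0 k.toNat).1 := by
      omega
    rw [hjc] at hA1 hA2
    have htotF : (bMerge ms ns 0 0 0 k.toNat).2.2
        = pvF ms ns k.toNat (bMerge ms ns 0 0 0 k.toNat).1 := by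
      rw [htot, hjc]
      rfl
    rw [bSwap_spec ms ns m _ _ _ hc1 hc2 htot]
    by_cases hcm : ((bMerge ms ns 0 0 0 k.toNat).1 : Int) ≤ m
    · rw [if_pos hcm]
      have hmem : pvF ms ns k.toNat (bMerge ms ns 0 0 0 k.toNat).1
          ∈ ((PySem.List.pyRange 0 (min m (ms.length : Int) + 1) 1).filter
            (fun i => decide (¬ (k - i < 0 ∨ k - i > (ns.length : Int))))).map
            (fun i => pvF ms ns k.toNat i.toNat) := by
        apply List.mem_map.mpr
        refine ⟨((bMerge ms ns 0 0 0 k.toNat).1 : Int), ?_, by simp⟩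
        apply List.mem_filter.mpr
        constructor
        · exact PySem.List.mem_pyRange_one.mpr ⟨by omega, by omega⟩
        · simp only [decide_eq_true_eq, not_not]
          omega
      have hmin : ∀ b ∈ ((PySem.List.pyRange 0 (min m (ms.length : Int) + 1) 1).filter
            (fun i => decide (¬ (k - i < 0 ∨ k - i > (ns.length : Int))))).map
            (fun i => pvF ms ns k.toNat i.toNat),
          pvF ms ns k.toNat (bMerge ms ns 0 0 0 k.toNat).1 ≤ b := by
        intro b hb
        obtain ⟨i, hifil, hib⟩ := List.mem_map.mp hb
        have hir := List.mem_filter.mp hifil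
        have h0 : 0 ≤ i := (PySem.List.mem_pyRange_one.mp hir.1).1
        have h1 : i < min m (ms.length : Int) + 1 := (PySem.List.mem_pyRange_one.mp hir.1).2
        have h2 : ¬ (k - i < 0 ∨ k - i > (ns.length : Int)) := by
          simpa using hir.2
        subst hib
        by_cases hile : i.toNat ≤ (bMerge ms ns 0 0 0 k.toNat).1
        · exact f_anti ms ns hms hns k.toNat (bMerge ms ns 0 0 0 k.toNat).1 hc1 (by omega)
            hA1 ((bMerge ms ns 0 0 0 k.toNat).1 - i.toNat) i.toNat
            (bMerge ms ns 0 0 0 k.toNat).1 (by omega) le_rfl (by omega)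
        · exact f_mono ms ns hms hns k.toNat (bMerge ms ns 0 0 0 k.toNat).1 (by omega)
            (by omega) hA2 (i.toNat - (bMerge ms ns 0 0 0 k.toNat).1) i.toNat (by omega)
            (by omega) (by omega)
      rw [List.min?_eq_some_iff.mpr ⟨hmem, hmin⟩, htotF]
    · rw [if_neg hcm]
      by_cases hfeas : 0 ≤ m ∧ ((bMerge ms ns 0 0 0 k.toNat).1 : Int) - m
          ≤ (ns.length : Int) - ((bMerge ms ns 0 0 0 k.toNat).2.1 : Int)
      · rw [if_pos hfeas]
        have hmlt : m.toNat < (bMerge ms ns 0 0 0 k.toNat).1 := by omega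
        have hBval : pvS ms m.toNat +
            pvS ns ((bMerge ms ns 0 0 0 k.toNat).2.1 + ((bMerge ms ns 0 0 0 k.toNat).1 - m.toNat))
            = pvF ms ns k.toNat m.toNat := by
          unfold pvF
          congr 1
          congr 1
          omega
        have hmem : pvF ms ns k.toNat m.toNat
            ∈ ((PySem.List.pyRange 0 (min m (ms.length : Int) + 1) 1).filter
              (fun i => decide (¬ (k - i < 0 ∨ k - i > (ns.length : Int))))).map
              (fun i => pvF ms ns k.toNat i.toNat) := by
          apply List.mem_map.mpr
          refine ⟨m, ?_, rfl⟩
          apply List.mem_filter.mpr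
          constructor
          · exact PySem.List.mem_pyRange_one.mpr ⟨by omega, by omega⟩
          · simp only [decide_eq_true_eq, not_not]
            omega
        have hmin : ∀ b ∈ ((PySem.List.pyRange 0 (min m (ms.length : Int) + 1) 1).filter
              (fun i => decide (¬ (k - i < 0 ∨ k - i > (ns.length : Int))))).map
              (fun i => pvF ms ns k.toNat i.toNat),
            pvF ms ns k.toNat m.toNat ≤ b := by
          intro b hb
          obtain ⟨i, hifil, hib⟩ := List.mem_map.mp hb
          have hir := List.mem_filter.mp hifil
          have h0 : 0 ≤ i := (PySem.List.mem_pyRange_one.mp hir.1).1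
          have h1 : i < min m (ms.length : Int) + 1 := (PySem.List.mem_pyRange_one.mp hir.1).2
          have h2 : ¬ (k - i < 0 ∨ k - i > (ns.length : Int)) := by
            simpa using hir.2
          subst hib
          exact f_anti ms ns hms hns k.toNat (bMerge ms ns 0 0 0 k.toNat).1 hc1 (by omega)
            hA1 (m.toNat - i.toNat) i.toNat m.toNat (by omega) (by omega) (by omega)
        rw [List.min?_eq_some_iff.mpr ⟨hmem, hmin⟩, hBval]
      · rw [if_neg hfeas]
        have hfil : (PySem.List.pyRange 0 (min m (ms.length : Int) + 1) 1).filter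
            (fun i => decide (¬ (k - i < 0 ∨ k - i > (ns.length : Int)))) = [] := by
          rw [List.filter_eq_nil_iff]
          intro i hi
          have h0 : 0 ≤ i := (PySem.List.mem_pyRange_one.mp hi).1
          have h1 : i < min m (ms.length : Int) + 1 := (PySem.List.mem_pyRange_one.mp hi).2
          simp only [decide_eq_true_eq, not_not]
          omega
        rw [hfil]
        rfl

lemma sorted_getD_mono (xs : List Int) (p q : Nat) (hpq : p ≤ q)
    (hq : q < (PySem.List.sorted xs (fun x => x) false).length) :
    (PySem.List.sorted xs (fun x => x) false).getD p 0 ≤ (PySem.List.sorted xs (fun x => x) false).getD q 0 := by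
  have h := PySem.List.sorted_id_getElem_mono (xs := xs) (p := p) (q := q) hpq hq
  rw [List.getD_eq_getElem _ _ (lt_of_le_of_lt hpq hq), List.getD_eq_getElem _ _ hq]
  exact h

-- ===== VERDICT (by name: the statement is the Claim_ definition above) =====
theorem solution_spec : Claim_equal_solution := by
  intro s a m k _ hpre
  unfold Spec_solution
  rw [solution_eq_aTail s a m k hpre, alt_eq_bTail s a m k]
  exact tails_eq _ _ m k (fun p q h hq => sorted_getD_mono _ p q h hq)
    (fun p q h hq => sorted_getD_mono _ p q h hq)
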